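-- pv_equiv track=rewrite | github.com/Filengun/PerfLab | task1/task1.py | interval_path
-- ===== SOURCE A (Python) =====
-- def interval_path(n: int, m: int) -> str:
--     """Определяем путь с интервалом."""
--     array = list(range(1, n + 1))
--     path = []
--     index = 0
--
--     for _ in range(n):
--         if array[index] not in path:
--             path.append(array[index])
--         index = (index + m - 1) % n
--
--     return ''.join(map(str, path))
-- ===== SOURCE B (Python) =====
-- def interval_path(n: int, m: int) -> str:
--     if n <= 0:
--         return ''
--     step = (m - 1) % n
--     a, b = step, n
--     while b:
--         a, b = b, a % b
--     p = n // a
--     return ''.join(str(i * step % n + 1) for i in range(p))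
-- ===== Notes on version B (the rewrite author's own statement) =====
-- stated objective: faster
-- what changed: Replaces the n-iteration walk with per-step linear membership scans by a closed-form cycle: step=(m-1)%n, cycle length p=n//gcd(step,n), and the path is exactly str(i*step%n+1) for i in range(p).
import Mathlib
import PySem

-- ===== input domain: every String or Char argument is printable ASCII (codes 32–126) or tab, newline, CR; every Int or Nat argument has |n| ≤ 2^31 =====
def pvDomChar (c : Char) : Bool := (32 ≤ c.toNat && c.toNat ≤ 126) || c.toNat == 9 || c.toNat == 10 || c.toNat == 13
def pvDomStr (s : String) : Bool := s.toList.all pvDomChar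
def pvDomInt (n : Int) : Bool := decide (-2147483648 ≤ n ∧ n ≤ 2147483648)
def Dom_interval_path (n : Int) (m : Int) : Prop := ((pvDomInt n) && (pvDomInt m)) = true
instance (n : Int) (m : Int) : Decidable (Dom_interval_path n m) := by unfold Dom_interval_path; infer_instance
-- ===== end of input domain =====

-- B replaces A's n-iteration walk with per-step list-membership scans by a gcd-based
-- closed form of the visit cycle (measured faster on large n).

-- ===== PORT A =====
-- A's loop body; the Option threads Python's IndexError (never hit: the index stays in [0, n)).
def ipStep (n : Int) (m : Int) (array : List Int) (st : Option (List Int × Int)) :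
    Option (List Int × Int) :=
  match st with
  | none => none
  | some (path, index) =>
    match PySem.List.pyGet? array index with
    | none => none
    | some v =>
      let path' := if path.contains v then path else path ++ [v]
      some (path', PySem.Int.mod (index + m - 1) n)

def interval_path (n : Int) (m : Int) : String :=
  let array := PySem.List.pyRange 1 (n + 1) 1
  let st := (PySem.List.pyRange 0 n 1).foldl (fun st _ => ipStep n m array st) (some ([], 0))
  match st with
  | some (path, _) => PySem.Str.join "" (path.map PySem.Int.toStr)
  | none => ""  -- unreachable (the IndexError branch is never taken)

-- ===== PORT B =====
-- the hand-written Euclid loop of Source B (while b: a, b = b, a % b)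
def ipGcd (a : Int) (b : Int) : Int :=
  if h : b = 0 then a else ipGcd b (PySem.Int.mod a b)
termination_by b.natAbs
decreasing_by
  rcases lt_or_gt_of_ne h with hb | hb
  · have h1 := (PySem.Int.mod_neg_bounds a hb).1
    have h2 := (PySem.Int.mod_neg_bounds a hb).2
    omega
  · have h1 := PySem.Int.mod_nonneg a hb
    have h2 := PySem.Int.mod_lt a hb
    omega

def interval_path_alt (n : Int) (m : Int) : String :=
  if n ≤ 0 then "" else
  let step := PySem.Int.mod (m - 1) n
  let p := PySem.Int.floordiv n (ipGcd step n)
  PySem.Str.join ""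
    ((PySem.List.pyRange 0 p 1).map (fun i => PySem.Int.toStr (PySem.Int.mod (i * step) n + 1)))

-- ===== PRECONDITION & SPEC =====
def Spec_interval_path (n : Int) (m : Int) (out : String) : Prop := out = interval_path_alt n m
instance (n : Int) (m : Int) (out : String) : Decidable (Spec_interval_path n m out) := by unfold Spec_interval_path; infer_instance

-- ===== CLAIM (what is proved, stated in full; the proofs are below) =====
def Claim_equal_interval_path : Prop := ∀ (n : Int) (m : Int), Dom_interval_path n m → Spec_interval_path n m (interval_path n m)

-- ===== LEMMAS AND PROOFS =====

theorem ip_key_dvd (N S d : Nat) (hN : 0 < N) :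
    N ∣ d * S ↔ (N / Nat.gcd S N) ∣ d := by
  set g := Nat.gcd S N with hg
  have hgpos : 0 < g := Nat.gcd_pos_of_pos_right S hN
  have hgN : g ∣ N := Nat.gcd_dvd_right S N
  have hgS : g ∣ S := Nat.gcd_dvd_left S N
  have hN' : N = g * (N / g) := (Nat.mul_div_cancel' hgN).symm
  have hS' : S = g * (S / g) := (Nat.mul_div_cancel' hgS).symm
  have hcop : Nat.Coprime (S / g) (N / g) := Nat.coprime_div_gcd_div_gcd hgpos
  constructor
  · intro hdvd
    have : g * (N / g) ∣ d * (g * (S / g)) := by rw [← hN', ← hS']; exact hdvd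
    have : g * (N / g) ∣ g * (d * (S / g)) := by
      rw [show g * (d * (S/g)) = d * (g * (S/g)) by ring]; exact this
    have h2 : N / g ∣ d * (S / g) := (mul_dvd_mul_iff_left (by omega : g ≠ 0)).mp this
    exact (Nat.Coprime.dvd_of_dvd_mul_right (Nat.Coprime.symm hcop) h2)
  · intro hdvd
    obtain ⟨e, he⟩ := hdvd
    refine ⟨e * (S / g), ?_⟩
    rw [he]
    calc N / g * e * S = N / g * e * (g * (S / g)) := by rw [← hS']
    _ = (g * (N / g)) * (e * (S / g)) := by ring
    _ = N * (e * (S / g)) := by rw [← hN']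

theorem ip_modeq (N S i j : Nat) (hN : 0 < N) (hij : i ≤ j) :
    (i * S % N = j * S % N) ↔ (N / Nat.gcd S N) ∣ (j - i) := by
  have h1 : (i * S % N = j * S % N) ↔ Nat.ModEq N (i * S) (j * S) := Iff.rfl
  rw [h1, Nat.modEq_iff_dvd' (Nat.mul_le_mul_right S hij), ← Nat.sub_mul, ip_key_dvd _ _ _ hN]

theorem ip_gcd_eq_gcd (a b : Int) (ha : 0 ≤ a) (hb : 0 ≤ b) :
    ipGcd a b = (Int.gcd a b : Int) := by
  by_cases h : b = 0
  · subst h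
    rw [ipGcd]
    simp [Int.gcd, Int.natAbs_of_nonneg ha]
  · have hbpos : 0 < b := lt_of_le_of_ne hb (Ne.symm h)
    rw [ipGcd]
    simp only [h, dite_false]
    have hm : PySem.Int.mod a b = a % b := PySem.Int.mod_eq_emod_of_pos hbpos
    rw [hm]
    have h1 : 0 ≤ a % b := Int.emod_nonneg a h
    have h2 : a % b < b := Int.emod_lt_of_pos a hbpos
    rw [ip_gcd_eq_gcd b (a % b) hb h1]
    congr 1
    rw [Int.emod_def, Int.gcd_comm]
    have : a - b * (a / b) = a + b * (-(a / b)) := by ring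
    rw [this, Int.gcd_add_mul_left_left b a (-(a/b))]
termination_by b.natAbs
decreasing_by
  have h1 := PySem.Int.mod_nonneg a (by omega : (0:Int) < b)
  have h2 := PySem.Int.mod_lt a (by omega : (0:Int) < b)
  omega

theorem ip_foldl_ignore {α β : Type} (F : α → α) (l : List β) (init : α) :
    l.foldl (fun st _ => F st) init = F^[l.length] init := by
  induction l generalizing init with
  | nil => rfl
  | cons x xs ih =>
    simp only [List.foldl_cons, List.length_cons, ih, Function.iterate_succ_apply]

def ipS (n m : Int) : Int := PySem.Int.mod (m-1) n

def ipP (n m : Int) : Nat := n.toNat / Nat.gcd (ipS n m).toNat n.toNat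

def ipIdx (n m : Int) (k : Nat) : Int := PySem.Int.mod ((k:Int) * ipS n m) n

def ipPath (n m : Int) (k : Nat) : List Int :=
  (List.range (min k (ipP n m))).map (fun i => ipIdx n m i + 1)

theorem ip_step_eq (n m : Int) (hn : 0 < n) (k : Nat) (hk : k < n.toNat) :
    ipStep n m (PySem.List.pyRange 1 (n + 1) 1) (some (ipPath n m k, ipIdx n m k))
    = some (ipPath n m (k+1), ipIdx n m (k+1)) := by
  have hs : ipS n m = PySem.Int.mod (m-1) n := rfl
  set s := PySem.Int.mod (m-1) n with hsdef
  set N := n.toNat with hN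
  set S := s.toNat with hS
  set P := N / Nat.gcd S N with hP
  have hPeq : ipP n m = P := rfl
  have hNpos : 0 < N := by omega
  have hs0 : 0 ≤ s := PySem.Int.mod_nonneg (m-1) hn
  have hs1 : s < n := PySem.Int.mod_lt (m-1) hn
  have hnN : (N : Int) = n := by omega
  have hsS : (S : Int) = s := by omega
  have hgpos : 0 < Nat.gcd S N := Nat.gcd_pos_of_pos_right S hNpos
  have hPpos : 0 < P := Nat.div_pos (Nat.le_of_dvd hNpos (Nat.gcd_dvd_right S N)) hgpos
  have hPN : P ≤ N := Nat.div_le_self N _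
  have hfi : ∀ i : Nat, ipIdx n m i = PySem.Int.mod ((i:Int) * s) n := fun i => rfl
  have fNat : ∀ i : Nat, PySem.Int.mod ((i:Int) * s) n = ((i * S % N : Nat) : Int) := by
    intro i
    rw [PySem.Int.mod_eq_emod_of_pos hn, ← hsS, ← hnN]
    push_cast
    rfl
  have inj : ∀ i j : Nat, i < j → j < P → PySem.Int.mod ((i:Int) * s) n ≠ PySem.Int.mod ((j:Int) * s) n := by
    intro i j hij hjP hEq
    rw [fNat, fNat] at hEq
    have : i * S % N = j * S % N := by exact_mod_cast hEq
    rw [ip_modeq N S i j hNpos (by omega)] at this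
    have := Nat.le_of_dvd (by omega) this
    omega
  have per : ∀ k : Nat, PySem.Int.mod ((k:Int) * s) n = PySem.Int.mod (((k % P : Nat):Int) * s) n := by
    intro k
    rw [fNat, fNat]
    congr 1
    rw [eq_comm, ip_modeq N S (k % P) k hNpos (Nat.mod_le k P)]
    have hdiv : P ∣ k - k % P := ⟨k / P, by have h := Nat.div_add_mod k P; omega⟩
    exact hdiv
  -- bounds on f k
  have fb : ∀ i : Nat, 0 ≤ PySem.Int.mod ((i:Int) * s) n ∧ PySem.Int.mod ((i:Int) * s) n < n :=
    fun i => ⟨PySem.Int.mod_nonneg _ hn, PySem.Int.mod_lt _ hn⟩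
  -- array lookup
  have harr : ∀ i : Nat, PySem.List.pyGet? (PySem.List.pyRange 1 (n + 1) 1) (PySem.Int.mod ((i:Int) * s) n)
      = some (PySem.Int.mod ((i:Int) * s) n + 1) := by
    intro i
    obtain ⟨h0, h1⟩ := fb i
    rw [PySem.List.pyGet?_of_nonneg _ h0]
    have hlen : (PySem.List.pyRange 1 (n + 1) 1).length = N := by
      rw [PySem.List.length_pyRange_one]; omega
    have hlt : (PySem.Int.mod ((i:Int) * s) n).toNat < (PySem.List.pyRange 1 (n + 1) 1).length := by
      rw [hlen]; omega
    rw [List.getElem?_eq_getElem hlt, PySem.List.getElem_pyRange_one]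
    congr 1
    omega
  -- index update
  have hupd : ∀ i : Nat, PySem.Int.mod (PySem.Int.mod ((i:Int) * s) n + m - 1) n
      = PySem.Int.mod (((i:Int)+1) * s) n := by
    intro i
    rw [PySem.Int.mod_eq_emod_of_pos hn, PySem.Int.mod_eq_emod_of_pos hn,
        PySem.Int.mod_eq_emod_of_pos hn]
    have hsmod : s % n = s := Int.emod_eq_of_lt hs0 hs1
    have h1 : ((i:Int) * s % n + m - 1) = ((i:Int) * s % n + (m - 1)) := by ring
    rw [h1, Int.add_emod, Int.emod_emod_of_dvd _ dvd_rfl]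
    have h2 : (m - 1) % n = s := by rw [hsdef, PySem.Int.mod_eq_emod_of_pos hn]
    rw [h2]
    conv_rhs => rw [show ((i:Int)+1) * s = (i:Int) * s + s by ring, Int.add_emod, hsmod]
  -- now reduce the step
  have hv : PySem.List.pyGet? (PySem.List.pyRange 1 (n + 1) 1) (ipIdx n m k) = some (ipIdx n m k + 1) := harr k
  have hidx : PySem.Int.mod (ipIdx n m k + m - 1) n = ipIdx n m (k+1) := by
    rw [hfi k, hfi (k+1)]
    push_cast
    exact hupd k
  by_cases hkP : k < P
  · -- new element appended
    have hmem : ipIdx n m k + 1 ∉ ipPath n m k := by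
      intro hmem
      unfold ipPath at hmem
      rw [List.mem_map] at hmem
      obtain ⟨i, hi, hEq⟩ := hmem
      rw [List.mem_range] at hi
      have hik : i < k := by omega
      exact inj i k hik hkP (by rw [← hfi i, ← hfi k]; omega)
    have hconF : ((ipPath n m k).contains (ipIdx n m k + 1)) = false := by
      rw [Bool.eq_false_iff]
      intro hc
      exact hmem (List.contains_iff_mem.mp hc)
    have hpath : ipPath n m k ++ [ipIdx n m k + 1] = ipPath n m (k+1) := by
      unfold ipPath
      rw [hPeq, min_eq_left (le_of_lt hkP), min_eq_left (by omega : k + 1 ≤ P),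
          List.range_succ, List.map_append]
      rfl
    simp only [ipStep, hv, hconF, Bool.false_eq_true, if_false, hidx, hpath]
  · -- value already present
    have hkmod : k % P < P := Nat.mod_lt k hPpos
    have hmem : ipIdx n m k + 1 ∈ ipPath n m k := by
      unfold ipPath
      rw [List.mem_map]
      refine ⟨k % P, ?_, ?_⟩
      · rw [List.mem_range, hPeq]
        omega
      · rw [hfi (k % P), hfi k, ← per k]
    have hconT : ((ipPath n m k).contains (ipIdx n m k + 1)) = true :=
      List.contains_iff_mem.mpr hmem
    have hpath : ipPath n m k = ipPath n m (k+1) := by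
      unfold ipPath
      rw [hPeq, min_eq_right (by omega : P ≤ k), min_eq_right (by omega : P ≤ k + 1)]
    simp only [ipStep, hv, hconT, if_true, hidx, ← hpath]

theorem ip_inv (n m : Int) (hn : 0 < n) (k : Nat) (hk : k ≤ n.toNat) :
    (fun st => ipStep n m (PySem.List.pyRange 1 (n+1) 1) st)^[k] (some ([], 0))
      = some (ipPath n m k, ipIdx n m k) := by
  induction k with
  | zero =>
    simp only [Function.iterate_zero, id_eq]
    unfold ipPath ipIdx
    rw [PySem.Int.mod_eq_emod_of_pos hn]
    norm_num
  | succ k ih =>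
    rw [Function.iterate_succ_apply', ih (by omega)]
    exact ip_step_eq n m hn k (by omega)

theorem ip_join_eq (n s : Int) (P : Nat) :
    (List.range P).map (PySem.Int.toStr ∘ fun i : Nat => PySem.Int.mod ((i:Int) * s) n + 1)
    = (PySem.List.pyRange 0 ((P:Nat):Int) 1).map
        (fun i => PySem.Int.toStr (PySem.Int.mod (i * s) n + 1)) := by
  induction P with
  | zero => rfl
  | succ k ih =>
    have hcast : ((k+1 : Nat) : Int) = ((k : Nat) : Int) + 1 := by push_cast; ring
    rw [List.range_succ, List.map_append, ih, hcast,
        PySem.List.pyRange_one_succ_right (by positivity), List.map_append]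
    rfl

theorem ip_main (n m : Int) : interval_path n m = interval_path_alt n m := by
  by_cases hn : n ≤ 0
  · unfold interval_path interval_path_alt
    rw [if_pos hn, PySem.List.pyRange_one_eq_nil hn]
    rfl
  · rw [not_le] at hn
    set s := PySem.Int.mod (m - 1) n with hsdef
    set N := n.toNat with hN
    set S := s.toNat with hS
    set P := N / Nat.gcd S N with hP
    have hNpos : 0 < N := by omega
    have hs0 : 0 ≤ s := PySem.Int.mod_nonneg (m-1) hn
    have hs1 : s < n := PySem.Int.mod_lt (m-1) hn
    have hnN : (N : Int) = n := by omega
    have hgpos : 0 < Nat.gcd S N := Nat.gcd_pos_of_pos_right S hNpos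
    have hPpos : 0 < P := Nat.div_pos (Nat.le_of_dvd hNpos (Nat.gcd_dvd_right S N)) hgpos
    have hPN : P ≤ N := Nat.div_le_self N _
    -- A side
    have hlen : (PySem.List.pyRange 0 n 1).length = N := by
      rw [PySem.List.length_pyRange_one]; omega
    have hA : interval_path n m
        = PySem.Str.join "" ((ipPath n m N).map PySem.Int.toStr) := by
      simp only [interval_path]
      rw [ip_foldl_ignore (fun st => ipStep n m (PySem.List.pyRange 1 (n + 1) 1) st)
            (PySem.List.pyRange 0 n 1) (some ([], 0)), hlen,
          ip_inv n m hn N le_rfl]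
    have hpathN : ipPath n m N = (List.range P).map (fun i : Nat => PySem.Int.mod ((i:Int) * s) n + 1) := by
      unfold ipPath
      rw [show ipP n m = P from rfl, min_eq_right hPN]
      rfl
    -- B side
    have hgcd : ipGcd s n = ((Nat.gcd S N : Nat) : Int) := by
      rw [ip_gcd_eq_gcd s n hs0 (le_of_lt hn)]
      congr 1
      unfold Int.gcd
      congr 1 <;> omega
    have hfd : PySem.Int.floordiv n ((Nat.gcd S N : Nat) : Int) = ((P : Nat) : Int) := by
      rw [← hnN, PySem.Int.floordiv_natCast]
    have hB : interval_path_alt n m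
        = PySem.Str.join "" ((PySem.List.pyRange 0 ((P : Nat) : Int) 1).map
            (fun i => PySem.Int.toStr (PySem.Int.mod (i * s) n + 1))) := by
      unfold interval_path_alt
      rw [if_neg (by omega : ¬ n ≤ 0)]
      show PySem.Str.join ""
          ((PySem.List.pyRange 0 (PySem.Int.floordiv n (ipGcd s n)) 1).map
            (fun i => PySem.Int.toStr (PySem.Int.mod (i * s) n + 1))) = _
      rw [hgcd, hfd]
    rw [hA, hB, hpathN, List.map_map]
    congr 1
    exact ip_join_eq n s P

-- ===== VERDICT (by name: the statement is the Claim_ definition above) =====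
theorem interval_path_spec : Claim_equal_interval_path := by
  intro n m _
  show interval_path n m = interval_path_alt n m
  exact ip_main n m
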